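-- pv_equiv track=rewrite | github.com/K-Dongyoung/algo | programmers/부대복귀.py | solution
-- ===== SOURCE A (Python) =====
-- from collections import deque
--
-- def solution(n, roads, sources, destination):
--     answer = []
--
--     adj = [[] for _ in range(n + 1)]
--     for road in roads:
--         adj[road[0]].append(road[1])
--         adj[road[1]].append(road[0])
--
--     visited = [0] * (n + 1)
--     q = deque()
--
--     q.append(destination)
--     visited[destination] = 1
--
--     while q:
--         v = q.popleft()
--         for w in adj[v]:
--             if visited[w] == 0:
--                 q.append(w)
--                 visited[w] = visited[v] + 1
--
--     for source in sources:
--         if source == 0: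
--             answer.append(-1)
--         else:
--             answer.append(visited[source] - 1)
--
--     return answer
-- ===== SOURCE B (Python) =====
-- def solution(n, roads, sources, destination):
--     dist = [-1] * (n + 1)
--     dist[destination] = 0
--     level = 0
--     changed = True
--     while changed:
--         level += 1
--         changed = False
--         for road in roads:
--             a, b = road[0], road[1]
--             if dist[a] == level - 1 and dist[b] == -1:
--                 dist[b] = level
--                 changed = True
--             if dist[b] == level - 1 and dist[a] == -1:
--                 dist[a] = level
--                 changed = True
--     return [dist[s] for s in sources]
-- ===== Notes on version B (the rewrite author's own statement) =====
-- stated objective: alternative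
-- what changed: Replaces BFS (adjacency list + deque) by a Bellman-Ford-style distance computation: no adjacency list at all; B repeatedly sweeps the raw road list, in round k marking every unmarked endpoint whose other endpoint has distance k-1, until a sweep changes nothing; distances are stored directly (-1 = unreached) and read off per source.
-- outside the precondition, e.g. on solution(1, [[0, 1]], [0], 1): A returns [-1], B returns [1]; on solution(1, [], [0], 0): A returns [-1], B returns [0]
import Mathlib
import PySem

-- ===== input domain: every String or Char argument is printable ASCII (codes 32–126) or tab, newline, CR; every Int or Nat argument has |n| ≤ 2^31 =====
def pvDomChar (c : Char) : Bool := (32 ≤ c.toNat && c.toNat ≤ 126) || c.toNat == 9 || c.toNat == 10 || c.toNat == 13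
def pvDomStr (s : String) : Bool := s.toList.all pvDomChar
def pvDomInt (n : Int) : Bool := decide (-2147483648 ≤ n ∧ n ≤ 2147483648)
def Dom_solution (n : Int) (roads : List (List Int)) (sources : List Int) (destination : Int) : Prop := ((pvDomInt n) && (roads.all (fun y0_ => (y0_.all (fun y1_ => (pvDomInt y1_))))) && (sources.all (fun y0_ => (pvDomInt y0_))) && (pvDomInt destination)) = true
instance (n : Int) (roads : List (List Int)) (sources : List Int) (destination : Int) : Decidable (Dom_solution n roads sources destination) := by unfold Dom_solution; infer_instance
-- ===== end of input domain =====

-- B replaces A's BFS (adjacency list + deque) by a Bellman-Ford-style computation: no adjacency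
-- list; repeated sweeps over the raw road list mark, in round k, every unmarked endpoint whose
-- other endpoint has distance k-1, until a sweep changes nothing. Same return value, more work.

-- ===== PORT A =====
-- Python list indexing l[i] (negative wraps): resolved index; out-of-range raises in Python and is
-- excluded by Pre_, where the getD/set defaults below are exact on every admitted input.
def pyResolve (len : Nat) (i : Int) : Nat := if i < 0 then (i + len).toNat else i.toNat
def getI (l : List Int) (i : Int) (d : Int) : Int := l.getD (pyResolve l.length i) d
def setI (l : List Int) (i : Int) (x : Int) : List Int := l.set (pyResolve l.length i) x
def getL (l : List (List Int)) (i : Int) : List Int := l.getD (pyResolve l.length i) []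
def setL (l : List (List Int)) (i : Int) (x : List Int) : List (List Int) := l.set (pyResolve l.length i) x

-- A builds the adjacency list with two appends per road
def addRoad (adj : List (List Int)) (road : List Int) : List (List Int) :=
  let a := getI road 0 0
  let b := getI road 1 0
  let adj1 := setL adj a (getL adj a ++ [b])
  setL adj1 b (getL adj1 b ++ [a])

def buildAdj (n : Int) (roads : List (List Int)) : List (List Int) :=
  roads.foldl addRoad (List.replicate (n + 1).toNat [])

-- body of A's `for w in adj[v]` loop: enqueue unvisited w with visited[w] = visited[v] + 1
def stepA (v : Int) (st : List Int × List Int) (w : Int) : List Int × List Int :=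
  if getI st.2 w 1 = 0 then (st.1 ++ [w], setI st.2 w (getI st.2 v 1 + 1)) else st

-- A's `while q:` loop; the fuel argument only makes the recursion structural (it is never
-- exhausted on inputs satisfying Pre_, see the proofs)
def bfsQ (adj : List (List Int)) : Nat → List Int → List Int → List Int
  | 0, _, vis => vis
  | _ + 1, [], vis => vis
  | fuel + 1, v :: q, vis =>
    let st := (getL adj v).foldl (stepA v) (q, vis)
    bfsQ adj fuel st.1 st.2

def solution (n : Int) (roads : List (List Int)) (sources : List Int) (destination : Int) : List Int :=
  let adj := buildAdj n roads
  let visited := setI (List.replicate (n + 1).toNat 0) destination 1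
  let visited := bfsQ adj (2 * (n + 1).toNat + 2) [destination] visited
  sources.map (fun s => if s = 0 then (-1 : Int) else getI visited s 1 - 1)

-- ===== PORT B =====
-- body of B's `for road in roads` sweep: the two in-order relaxations of one road
def edgeStep (level : Int) (st : Bool × List Int) (road : List Int) : Bool × List Int :=
  let a := getI road 0 0
  let b := getI road 1 0
  let st1 := if getI st.2 a 0 = level - 1 ∧ getI st.2 b 0 = -1 then (true, setI st.2 b level) else st
  if getI st1.2 b 0 = level - 1 ∧ getI st1.2 a 0 = -1 then (true, setI st1.2 a level) else st1

-- B's `while changed:` loop (fuel: same remark as for bfsQ)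
def passLoop (roads : List (List Int)) : Nat → List Int → Int → List Int
  | 0, dist, _ => dist
  | fuel + 1, dist, level =>
    let st := roads.foldl (edgeStep (level + 1)) (false, dist)
    if st.1 then passLoop roads fuel st.2 (level + 1) else st.2

def solution_alt (n : Int) (roads : List (List Int)) (sources : List Int) (destination : Int) : List Int :=
  let dist := setI (List.replicate (n + 1).toNat (-1)) destination 0
  let dist := passLoop roads ((n + 1).toNat + 2) dist 0
  sources.map (fun s => getI dist s 0)

-- ===== PRECONDITION & SPEC =====
-- Pre_ admits every input on which A returns (all indices in range, roads of length ≥ 2,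
-- Python's negative-index wraparound included), except one defensible corner: when sources
-- contains the author's unreachable sentinel 0 while a road endpoint or the destination
-- actually reaches array slot 0 (label 0 or -(n+1)), A's hard-coded -1 for source 0 and B's
-- computed distance are both defensible on such a malformed graph; see claim.json "cites".
def Pre_solution (n : Int) (roads : List (List Int)) (sources : List Int) (destination : Int) : Prop :=
  0 ≤ n ∧
  (-(n + 1) ≤ destination ∧ destination ≤ n) ∧
  (∀ r ∈ roads, 2 ≤ r.length ∧ (-(n + 1) ≤ r.getD 0 0 ∧ r.getD 0 0 ≤ n) ∧
    (-(n + 1) ≤ r.getD 1 0 ∧ r.getD 1 0 ≤ n)) ∧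
  (∀ s ∈ sources, -(n + 1) ≤ s ∧ s ≤ n) ∧
  ((0 : Int) ∈ sources → pyResolve (n + 1).toNat destination ≠ 0 ∧
    ∀ r ∈ roads, pyResolve (n + 1).toNat (r.getD 0 0) ≠ 0 ∧ pyResolve (n + 1).toNat (r.getD 1 0) ≠ 0)
instance (n : Int) (roads : List (List Int)) (sources : List Int) (destination : Int) : Decidable (Pre_solution n roads sources destination) := by unfold Pre_solution; infer_instance

def pvWitness_solution : Int × List (List Int) × List Int × Int := (3, [[1, 2], [2, 3]], [0, 1, 3], 2)

def Spec_solution (n : Int) (roads : List (List Int)) (sources : List Int) (destination : Int) (out : List Int) : Prop := out = solution_alt n roads sources destination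
instance (n : Int) (roads : List (List Int)) (sources : List Int) (destination : Int) (out : List Int) : Decidable (Spec_solution n roads sources destination out) := by unfold Spec_solution; infer_instance

-- ===== CLAIM (what is proved, stated in full; the proofs are below) =====
def Claim_equal_solution : Prop := ∀ (n : Int) (roads : List (List Int)) (sources : List Int) (destination : Int), Dom_solution n roads sources destination → Pre_solution n roads sources destination → Spec_solution n roads sources destination (solution n roads sources destination)

-- ===== LEMMAS AND PROOFS =====

-- proof-side intermediate program: the level-synchronous form of A's BFS (used only in proofs:
-- bfsQ is coupled with levelLoop, and levelLoop with B's passLoop)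
def stepB (lvl : Nat) (st : List Int × List Int) (w : Int) : List Int × List Int :=
  if getI st.2 w 0 = -1 then (st.1 ++ [w], setI st.2 w (lvl : Int)) else st

def relaxB (adj : List (List Int)) (lvl : Nat) (st : List Int × List Int) (v : Int) : List Int × List Int :=
  (getL adj v).foldl (stepB lvl) st

def levelLoop (adj : List (List Int)) : Nat → List Int → List Int → Nat → List Int
  | 0, _, dist, _ => dist
  | fuel + 1, frontier, dist, level =>
    if frontier.isEmpty then dist
    else
      let st := frontier.foldl (relaxB adj (level + 1)) ([], dist)
      levelLoop adj fuel st.1 st.2 (level + 1)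

-- number of unvisited slots of A's visited array (the fuel/termination measure)
def Zc (l : List Int) : Nat := l.countP (fun x => decide (x = 0))

-- number of unreached slots of B's dist array
def Nc (l : List Int) : Nat := l.countP (fun x => decide (x = -1))

lemma length_setI (l : List Int) (i : Int) (x : Int) : (setI l i x).length = l.length := by
  simp [setI]

lemma getI_eq_of_resolve_eq (l : List Int) (i j : Int) (d : Int)
    (h : pyResolve l.length i = pyResolve l.length j) : getI l i d = getI l j d := by
  simp [getI, h]

lemma resolve_lt_of_getI_ne (l : List Int) (i : Int) (d : Int)
    (h : getI l i d ≠ d) : pyResolve l.length i < l.length := by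
  by_contra hge
  apply h
  simp [getI, List.getD_eq_getElem?_getD, List.getElem?_eq_none (le_of_not_gt hge)]

lemma getI_setI_self (l : List Int) (i : Int) (x d : Int)
    (h : pyResolve l.length i < l.length) : getI (setI l i x) i d = x := by
  simp [getI, setI, List.getD_eq_getElem?_getD, List.getElem?_set_self h]

lemma getI_setI_ne (l : List Int) (i j : Int) (x d : Int)
    (h : pyResolve l.length i ≠ pyResolve l.length j) : getI (setI l i x) j d = getI l j d := by
  simp [getI, setI, List.getD_eq_getElem?_getD, List.getElem?_set_ne h]

lemma getI_of_lt (l : List Int) (i : Int) (d : Int) (h : pyResolve l.length i < l.length) :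
    getI l i d = l[pyResolve l.length i] := by
  simp [getI, List.getD_eq_getElem?_getD, List.getElem?_eq_getElem h]

lemma Zc_setI (l : List Int) (i : Int) (x : Int)
    (h : pyResolve l.length i < l.length) (h0 : getI l i 1 = 0) (hx : x ≠ 0) :
    Zc (setI l i x) + 1 = Zc l := by
  have hl : l[pyResolve l.length i] = 0 := by rw [getI_of_lt l i 1 h] at h0; exact h0
  have hpos : 0 < l.countP (fun y => decide (y = 0)) :=
    List.countP_pos_iff.mpr ⟨l[pyResolve l.length i], List.getElem_mem h, by simp [hl]⟩
  unfold Zc setI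
  rw [List.countP_set h]
  simp only [hl, decide_true, if_true]
  rw [if_neg (by simp [hx])]
  omega

lemma map_sub_one_setI (l : List Int) (i : Int) (x : Int) :
    (setI l i x).map (fun y => y - 1) = setI (l.map (fun y => y - 1)) i (x - 1) := by
  simp [setI, List.map_set]

lemma getI_map_sub_one (l : List Int) (i : Int) :
    getI (l.map (fun y => y - 1)) i 0 = getI l i 1 - 1 := by
  unfold getI
  rw [List.length_map]
  rcases lt_or_ge (pyResolve l.length i) l.length with h | h
  · simp [List.getD_eq_getElem?_getD, List.getElem?_eq_getElem h,
      List.getElem?_eq_getElem (by simpa using h : pyResolve l.length i < (l.map (fun y => y - 1)).length)]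
  · rw [List.getD_eq_getElem?_getD, List.getD_eq_getElem?_getD,
      List.getElem?_eq_none h, List.getElem?_eq_none (by simpa using h)]
    simp

-- the joint inner loop: A's `for w in adj[v]` on (queue, visited) and the level form on (nxt, dist)
lemma inner_fold (v : Int) (lvl : Nat) :
    ∀ (ws qA accB vis : List Int), getI vis v 1 = (lvl : Int) + 1 →
    ∃ Δ : List Int,
      (ws.foldl (stepA v) (qA, vis)).1 = qA ++ Δ ∧
      (ws.foldl (stepB (lvl + 1)) (accB, vis.map (fun y => y - 1))).1 = accB ++ Δ ∧
      (ws.foldl (stepB (lvl + 1)) (accB, vis.map (fun y => y - 1))).2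
        = (ws.foldl (stepA v) (qA, vis)).2.map (fun y => y - 1) ∧
      (∀ x ∈ Δ, getI (ws.foldl (stepA v) (qA, vis)).2 x 1 = (lvl : Int) + 2) ∧
      (∀ k d, getI vis k d ≠ 0 → getI (ws.foldl (stepA v) (qA, vis)).2 k d = getI vis k d) ∧
      (ws.foldl (stepA v) (qA, vis)).2.length = vis.length ∧
      Zc (ws.foldl (stepA v) (qA, vis)).2 + Δ.length = Zc vis := by
  intro ws
  induction ws with
  | nil =>
    intro qA accB vis hv
    exact ⟨[], by simp, by simp, by simp, by simp, fun k d _ => rfl, rfl, by simp⟩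
  | cons w ws IH =>
    intro qA accB vis hv
    by_cases h0 : getI vis w 1 = 0
    · -- w is unvisited: both loops append it and mark it
      have hrw : pyResolve vis.length w < vis.length :=
        resolve_lt_of_getI_ne vis w 1 (by rw [h0]; norm_num)
      have hne : pyResolve vis.length w ≠ pyResolve vis.length v := by
        intro he
        rw [getI_eq_of_resolve_eq vis w v 1 he, hv] at h0
        omega
      have hsA : stepA v (qA, vis) w = (qA ++ [w], setI vis w ((lvl : Int) + 2)) := by
        simp only [stepA, h0, if_true, hv]
        rw [show ((lvl : Int) + 1 + 1) = (lvl : Int) + 2 by ring]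
      have hval : ((lvl + 1 : Nat) : Int) = ((lvl : Int) + 2) - 1 := by push_cast; ring
      have hmB : getI (vis.map (fun y => y - 1)) w 0 = -1 := by
        rw [getI_map_sub_one, h0]; norm_num
      have hsB : stepB (lvl + 1) (accB, vis.map (fun y => y - 1)) w
          = (accB ++ [w], (setI vis w ((lvl : Int) + 2)).map (fun y => y - 1)) := by
        simp only [stepB, hmB, if_true]
        rw [map_sub_one_setI, hval]
      have hv' : getI (setI vis w ((lvl : Int) + 2)) v 1 = (lvl : Int) + 1 := by
        rw [getI_setI_ne vis w v _ 1 hne, hv]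
      obtain ⟨Δ, c1, c2, c3, c4, c5, c6, c7⟩ :=
        IH (qA ++ [w]) (accB ++ [w]) (setI vis w ((lvl : Int) + 2)) hv'
      have hstep : ∀ k d, getI vis k d ≠ 0 →
          getI (setI vis w ((lvl : Int) + 2)) k d = getI vis k d := by
        intro k d hk
        refine getI_setI_ne vis w k _ d ?_
        intro he
        apply hk
        rw [getI_eq_of_resolve_eq vis k w d he.symm, getI_of_lt vis w d hrw,
          ← getI_of_lt vis w 1 hrw, h0]
      have hw2 : getI (setI vis w ((lvl : Int) + 2)) w 1 = (lvl : Int) + 2 := by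
        rw [getI_setI_self vis w _ 1 hrw]
      refine ⟨w :: Δ, ?_, ?_, ?_, ?_, ?_, ?_, ?_⟩
      · rw [List.foldl_cons, hsA, c1]; simp
      · rw [List.foldl_cons, hsB, c2]; simp
      · rw [List.foldl_cons, List.foldl_cons, hsA, hsB, c3]
      · intro x hx
        rw [List.foldl_cons, hsA]
        rcases List.mem_cons.mp hx with hx | hx
        · subst hx
          rw [c5 x 1 (by rw [hw2]; omega), hw2]
        · exact c4 x hx
      · intro k d hk
        rw [List.foldl_cons, hsA, c5 k d (by rw [hstep k d hk]; exact hk), hstep k d hk]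
      · rw [List.foldl_cons, hsA, c6, length_setI]
      · rw [List.foldl_cons, hsA]
        have hz : Zc (setI vis w ((lvl : Int) + 2)) + 1 = Zc vis :=
          Zc_setI vis w _ hrw h0 (by omega)
        simp only [List.length_cons]
        omega
    · -- w already has a distance: both loops skip it
      have hsA : stepA v (qA, vis) w = (qA, vis) := by simp [stepA, h0]
      have hmB : ¬ (getI (vis.map (fun y => y - 1)) w 0 = -1) := by
        rw [getI_map_sub_one]
        intro hc
        exact h0 (by omega)
      have hsB : stepB (lvl + 1) (accB, vis.map (fun y => y - 1)) w
          = (accB, vis.map (fun y => y - 1)) := by simp [stepB, hmB]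
      rw [List.foldl_cons, List.foldl_cons, hsA, hsB]
      exact IH qA accB vis hv

-- the heart of the A-side proof: A's queue BFS, whose queue is (rest of current level ++ next
-- level so far), equals the level-synchronous loop finishing the current level's fold
lemma main_cons (adj : List (List Int)) (fuelB level : Nat) (v : Int) (f : List Int)
    (IH : ∀ (fuelA : Nat) (acc vis dist : List Int),
      dist = vis.map (fun y => y - 1) →
      (∀ x ∈ f, getI vis x 1 = (level : Int) + 1) →
      (∀ x ∈ acc, getI vis x 1 = (level : Int) + 2) →
      2 * Zc vis + f.length + acc.length < fuelA →
      Zc vis + (if acc.isEmpty then 0 else 1) ≤ fuelB →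
      (bfsQ adj fuelA (f ++ acc) vis).map (fun y => y - 1)
        = (let st := f.foldl (relaxB adj (level + 1)) (acc, dist);
           levelLoop adj fuelB st.1 st.2 (level + 1))) :
    ∀ (fuelA : Nat) (acc vis dist : List Int),
      dist = vis.map (fun y => y - 1) →
      (∀ x ∈ v :: f, getI vis x 1 = (level : Int) + 1) →
      (∀ x ∈ acc, getI vis x 1 = (level : Int) + 2) →
      2 * Zc vis + (v :: f).length + acc.length < fuelA →
      Zc vis + (if acc.isEmpty then 0 else 1) ≤ fuelB →
      (bfsQ adj fuelA ((v :: f) ++ acc) vis).map (fun y => y - 1)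
        = (let st := (v :: f).foldl (relaxB adj (level + 1)) (acc, dist);
           levelLoop adj fuelB st.1 st.2 (level + 1)) := by
  intro fuelA acc vis dist h1 h2 h5 h4 hB
  subst h1
  cases fuelA with
  | zero => simp at h4
  | succ fa =>
    have hv := h2 v List.mem_cons_self
    obtain ⟨Δ, c1, c2, c3, c4, c5, c6, c7⟩ :=
      inner_fold v level (getL adj v) (f ++ acc) acc vis hv
    have h2' : ∀ x ∈ f, getI ((getL adj v).foldl (stepA v) (f ++ acc, vis)).2 x 1
        = (level : Int) + 1 := by
      intro x hx
      rw [c5 x 1 (by rw [h2 x (List.mem_cons_of_mem v hx)]; omega),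
        h2 x (List.mem_cons_of_mem v hx)]
    have h5' : ∀ x ∈ acc ++ Δ, getI ((getL adj v).foldl (stepA v) (f ++ acc, vis)).2 x 1
        = (level : Int) + 2 := by
      intro x hx
      rcases List.mem_append.mp hx with hx | hx
      · rw [c5 x 1 (by rw [h5 x hx]; omega), h5 x hx]
      · exact c4 x hx
    have h4' : 2 * Zc ((getL adj v).foldl (stepA v) (f ++ acc, vis)).2
        + f.length + (acc ++ Δ).length < fa := by
      rw [List.length_append]
      simp only [List.length_cons] at h4
      omega
    have hB' : Zc ((getL adj v).foldl (stepA v) (f ++ acc, vis)).2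
        + (if (acc ++ Δ).isEmpty then 0 else 1) ≤ fuelB := by
      rcases Δ with _ | ⟨d0, Δt⟩
      · have hz : Zc ((getL adj v).foldl (stepA v) (f ++ acc, vis)).2 = Zc vis := by
          simpa using c7
        rw [List.append_nil, hz]
        exact hB
      · have : ¬ (acc ++ d0 :: Δt).isEmpty = true := by simp
        rw [if_neg this]
        simp only [List.length_cons] at c7
        rcases acc with _ | ⟨a0, at0⟩ <;> simp_all <;> omega
    have hrelax : relaxB adj (level + 1) (acc, vis.map (fun y => y - 1)) v
        = (acc ++ Δ, ((getL adj v).foldl (stepA v) (f ++ acc, vis)).2.map (fun y => y - 1)) :=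
      Prod.ext c2 c3
    have hun : bfsQ adj (fa + 1) (v :: (f ++ acc)) vis
        = bfsQ adj fa ((getL adj v).foldl (stepA v) (f ++ acc, vis)).1
            ((getL adj v).foldl (stepA v) (f ++ acc, vis)).2 := rfl
    simp only [List.cons_append]
    rw [hun, c1, List.append_assoc,
      IH fa (acc ++ Δ) ((getL adj v).foldl (stepA v) (f ++ acc, vis)).2
        (((getL adj v).foldl (stepA v) (f ++ acc, vis)).2.map (fun y => y - 1))
        rfl h2' h5' h4' hB']
    rw [List.foldl_cons, hrelax]

lemma main_bfs (adj : List (List Int)) :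
    ∀ (fuelB : Nat) (f : List Int) (fuelA : Nat) (acc vis dist : List Int) (level : Nat),
      dist = vis.map (fun y => y - 1) →
      (∀ x ∈ f, getI vis x 1 = (level : Int) + 1) →
      (∀ x ∈ acc, getI vis x 1 = (level : Int) + 2) →
      2 * Zc vis + f.length + acc.length < fuelA →
      Zc vis + (if acc.isEmpty then 0 else 1) ≤ fuelB →
      (bfsQ adj fuelA (f ++ acc) vis).map (fun y => y - 1)
        = (let st := f.foldl (relaxB adj (level + 1)) (acc, dist);
           levelLoop adj fuelB st.1 st.2 (level + 1)) := by
  intro fuelB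
  induction fuelB with
  | zero =>
    intro f fuelA acc vis dist level h1 h2 h5 h4 hB
    induction f generalizing fuelA acc vis dist with
    | nil =>
      rcases acc with _ | ⟨a0, acc'⟩
      · cases fuelA with
        | zero => simp at h4
        | succ fa => simpa [bfsQ, levelLoop] using h1.symm
      · simp at hB
    | cons v f' IHf =>
      exact main_cons adj 0 level v f' IHf fuelA acc vis dist h1 h2 h5 h4 hB
  | succ fb IHB =>
    intro f fuelA acc vis dist level h1 h2 h5 h4 hB
    induction f generalizing fuelA acc vis dist with
    | nil =>
      rcases acc with _ | ⟨a0, acc'⟩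
      · cases fuelA with
        | zero => simp at h4
        | succ fa => simpa [bfsQ, levelLoop] using h1.symm
      · have h2' : ∀ x ∈ a0 :: acc', getI vis x 1 = ((level + 1 : Nat) : Int) + 1 := by
          intro x hx
          rw [h5 x hx]
          push_cast
          ring
        have step := IHB (a0 :: acc') fuelA [] vis dist (level + 1) h1 h2'
          (by simp) (by simpa using h4) (by simpa using hB)
        simp only [List.append_nil] at step
        simp only [List.nil_append, List.foldl_nil]
        rw [step]
        rfl
    | cons v f' IHf =>
      exact main_cons adj (fb + 1) level v f' IHf fuelA acc vis dist h1 h2 h5 h4 hB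

-- slot 0 of the visited array is never written when no adjacency entry resolves to index 0
lemma getD0_set (l : List Int) (k : Nat) (x d : Int) (hk : k ≠ 0) :
    (l.set k x).getD 0 d = l.getD 0 d := by
  rw [List.getD_eq_getElem?_getD, List.getD_eq_getElem?_getD, List.getElem?_set_ne hk]

lemma fold_getD0 (v : Int) (m : Nat) (ws : List Int) (hws : ∀ w ∈ ws, pyResolve m w ≠ 0) :
    ∀ (st : List Int × List Int) (d : Int), st.2.length = m →
      ((ws.foldl (stepA v) st).2).getD 0 d = st.2.getD 0 d ∧
      (ws.foldl (stepA v) st).2.length = m := by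
  induction ws with
  | nil => exact fun st d hl => ⟨rfl, hl⟩
  | cons w ws IH =>
    intro st d hl
    have hstep : (stepA v st w).2.getD 0 d = st.2.getD 0 d ∧ (stepA v st w).2.length = m := by
      unfold stepA
      split_ifs with h
      · refine ⟨getD0_set _ _ _ d ?_, by rw [length_setI]; exact hl⟩
        rw [hl]
        exact hws w List.mem_cons_self
      · exact ⟨rfl, hl⟩
    obtain ⟨hrec, hlen⟩ := IH (fun x hx => hws x (List.mem_cons_of_mem w hx)) (stepA v st w) d hstep.2
    exact ⟨by rw [List.foldl_cons, hrec, hstep.1], by rw [List.foldl_cons]; exact hlen⟩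

lemma bfsQ_getD0 (adj : List (List Int)) (m : Nat)
    (Hadj : ∀ v, ∀ w ∈ getL adj v, pyResolve m w ≠ 0) :
    ∀ (fuel : Nat) (q vis : List Int) (d : Int), vis.length = m →
      (bfsQ adj fuel q vis).getD 0 d = vis.getD 0 d := by
  intro fuel
  induction fuel with
  | zero => intro q vis d _; rfl
  | succ fu IH =>
    intro q vis d hl
    cases q with
    | nil => rfl
    | cons v q =>
      obtain ⟨hg, hlen⟩ := fold_getD0 v m (getL adj v) (Hadj v) (q, vis) d hl
      rw [show bfsQ adj (fu + 1) (v :: q) vis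
          = bfsQ adj fu ((getL adj v).foldl (stepA v) (q, vis)).1
              ((getL adj v).foldl (stepA v) (q, vis)).2 from rfl,
        IH _ _ d hlen, hg]

lemma getL_setL_cases (l : List (List Int)) (i : Int) (x : List Int) (v : Int) :
    getL (setL l i x) v = x ∨ getL (setL l i x) v = getL l v := by
  unfold getL setL
  rcases lt_or_ge (pyResolve l.length i) l.length with hi | hi
  · rw [List.length_set]
    by_cases he : pyResolve l.length i = pyResolve l.length v
    · left
      rw [← he, List.getD_eq_getElem?_getD, List.getElem?_set_self hi]
      rfl
    · right
      rw [List.getD_eq_getElem?_getD, List.getElem?_set_ne he, ← List.getD_eq_getElem?_getD]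
  · right
    rw [List.set_eq_of_length_le hi]

lemma addRoad_mem (adj : List (List Int)) (r : List Int) (v w : Int)
    (hw : w ∈ getL (addRoad adj r) v) :
    (∃ u, w ∈ getL adj u) ∨ w = getI r 0 0 ∨ w = getI r 1 0 := by
  unfold addRoad at hw
  rcases getL_setL_cases (setL adj (getI r 0 0) (getL adj (getI r 0 0) ++ [getI r 1 0]))
      (getI r 1 0) _ v with h | h
  · rw [h] at hw
    rcases List.mem_append.mp hw with hw | hw
    · rcases getL_setL_cases adj (getI r 0 0) _ (getI r 1 0) with h2 | h2
      · rw [h2] at hw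
        rcases List.mem_append.mp hw with hw | hw
        · exact Or.inl ⟨getI r 0 0, hw⟩
        · exact Or.inr (Or.inr (by simpa using hw))
      · rw [h2] at hw
        exact Or.inl ⟨getI r 1 0, hw⟩
    · exact Or.inr (Or.inl (by simpa using hw))
  · rw [h] at hw
    rcases getL_setL_cases adj (getI r 0 0) _ v with h2 | h2
    · rw [h2] at hw
      rcases List.mem_append.mp hw with hw | hw
      · exact Or.inl ⟨getI r 0 0, hw⟩
      · exact Or.inr (Or.inr (by simpa using hw))
    · rw [h2] at hw
      exact Or.inl ⟨v, hw⟩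

lemma foldl_addRoad_mem : ∀ (roads adj0 : List (List Int)) (v w : Int),
    w ∈ getL (roads.foldl addRoad adj0) v →
    (∃ u, w ∈ getL adj0 u) ∨ ∃ r ∈ roads, w = getI r 0 0 ∨ w = getI r 1 0 := by
  intro roads
  induction roads with
  | nil => exact fun adj0 v w hw => Or.inl ⟨v, hw⟩
  | cons r roads IH =>
    intro adj0 v w hw
    rw [List.foldl_cons] at hw
    rcases IH (addRoad adj0 r) v w hw with ⟨u, hu⟩ | ⟨r', hr', h⟩
    · rcases addRoad_mem adj0 r u w hu with h | h
      · exact Or.inl h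
      · exact Or.inr ⟨r, List.mem_cons_self, h⟩
    · exact Or.inr ⟨r', List.mem_cons_of_mem r hr', h⟩

lemma buildAdj_mem (n : Int) (roads : List (List Int)) (v w : Int)
    (hw : w ∈ getL (buildAdj n roads) v) :
    ∃ r ∈ roads, w = getI r 0 0 ∨ w = getI r 1 0 := by
  unfold buildAdj at hw
  rcases foldl_addRoad_mem roads _ v w hw with ⟨u, hu⟩ | h
  · exfalso
    have : getL (List.replicate (n + 1).toNat ([] : List Int)) u = [] := by
      unfold getL
      rw [List.getD_eq_getElem?_getD, List.getElem?_replicate]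
      split_ifs <;> rfl
    rw [this] at hu
    simp at hu
  · exact h

-- ========== the B-side coupling: levelLoop = passLoop ==========

lemma length_setL (l : List (List Int)) (i : Int) (x : List Int) : (setL l i x).length = l.length := by
  simp [setL]

lemma getL_setL_self (l : List (List Int)) (i : Int) (x : List Int) (v : Int)
    (hi : pyResolve l.length i < l.length)
    (he : pyResolve l.length i = pyResolve l.length v) : getL (setL l i x) v = x := by
  simp [getL, setL, List.getD_eq_getElem?_getD, ← he, List.getElem?_set_self hi]

lemma getL_setL_ne (l : List (List Int)) (i : Int) (x : List Int) (v : Int)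
    (hne : pyResolve l.length i ≠ pyResolve l.length v) : getL (setL l i x) v = getL l v := by
  simp [getL, setL, List.getD_eq_getElem?_getD, List.getElem?_set_ne hne]

lemma addRoad_length (adj : List (List Int)) (r : List Int) :
    (addRoad adj r).length = adj.length := by
  simp [addRoad, length_setL]

lemma getL_congr (l : List (List Int)) (i j : Int)
    (h : pyResolve l.length i = pyResolve l.length j) : getL l i = getL l j := by
  simp [getL, h]

lemma addRoad_mem_iff (adj : List (List Int)) (r : List Int) (v w : Int)
    (h0 : pyResolve adj.length (getI r 0 0) < adj.length)
    (h1 : pyResolve adj.length (getI r 1 0) < adj.length) :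
    w ∈ getL (addRoad adj r) v ↔ w ∈ getL adj v ∨
      (pyResolve adj.length (getI r 0 0) = pyResolve adj.length v ∧ w = getI r 1 0) ∨
      (pyResolve adj.length (getI r 1 0) = pyResolve adj.length v ∧ w = getI r 0 0) := by
  unfold addRoad
  have hl1 : (setL adj (getI r 0 0) (getL adj (getI r 0 0) ++ [getI r 1 0])).length
      = adj.length := length_setL _ _ _
  by_cases hv1 : pyResolve adj.length (getI r 1 0) = pyResolve adj.length v
  · rw [getL_setL_self _ _ _ v (by rw [hl1]; exact h1) (by rw [hl1]; exact hv1)]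
    by_cases hv0 : pyResolve adj.length (getI r 0 0) = pyResolve adj.length (getI r 1 0)
    · rw [getL_setL_self adj _ _ _ h0 hv0,
        getL_congr adj (getI r 0 0) v (by rw [hv0, hv1])]
      simp only [List.mem_append, List.mem_singleton, hv1, hv0.trans hv1]
      tauto
    · rw [getL_setL_ne adj _ _ _ hv0, getL_congr adj (getI r 1 0) v hv1]
      have hne : ¬ pyResolve adj.length (getI r 0 0) = pyResolve adj.length v := by
        rw [← hv1]; exact hv0
      simp only [List.mem_append, List.mem_singleton, hv1, hne]
      tauto
  · rw [getL_setL_ne _ _ _ v (by rw [hl1]; exact hv1)]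
    by_cases hv0 : pyResolve adj.length (getI r 0 0) = pyResolve adj.length v
    · rw [getL_setL_self adj _ _ v h0 hv0, getL_congr adj (getI r 0 0) v hv0]
      simp only [List.mem_append, List.mem_singleton, hv1, hv0]
      tauto
    · rw [getL_setL_ne adj _ _ v hv0]
      simp only [hv1, hv0]
      tauto

lemma foldl_addRoad_mem_iff (m : Nat) : ∀ (roads adj0 : List (List Int)), adj0.length = m →
    (∀ r ∈ roads, pyResolve m (getI r 0 0) < m ∧ pyResolve m (getI r 1 0) < m) →
    ∀ (v w : Int), w ∈ getL (roads.foldl addRoad adj0) v ↔ w ∈ getL adj0 v ∨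
      ∃ r ∈ roads, (pyResolve m (getI r 0 0) = pyResolve m v ∧ w = getI r 1 0) ∨
        (pyResolve m (getI r 1 0) = pyResolve m v ∧ w = getI r 0 0) := by
  intro roads
  induction roads with
  | nil => intro adj0 hlen hr v w; simp
  | cons r roads IH =>
    intro adj0 hlen hr v w
    rw [List.foldl_cons,
      IH (addRoad adj0 r) (by rw [addRoad_length]; exact hlen)
        (fun r' hr' => hr r' (List.mem_cons_of_mem r hr')) v w]
    have hmem := addRoad_mem_iff adj0 r v w
      (by rw [hlen]; exact (hr r List.mem_cons_self).1)
      (by rw [hlen]; exact (hr r List.mem_cons_self).2)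
    rw [hlen] at hmem
    rw [hmem, List.exists_mem_cons_iff]
    exact or_assoc

lemma buildAdj_mem_iff (n : Int) (roads : List (List Int))
    (hr : ∀ r ∈ roads, pyResolve (n + 1).toNat (getI r 0 0) < (n + 1).toNat ∧
      pyResolve (n + 1).toNat (getI r 1 0) < (n + 1).toNat) (v w : Int) :
    w ∈ getL (buildAdj n roads) v ↔
      ∃ r ∈ roads, (pyResolve (n + 1).toNat (getI r 0 0) = pyResolve (n + 1).toNat v ∧ w = getI r 1 0) ∨
        (pyResolve (n + 1).toNat (getI r 1 0) = pyResolve (n + 1).toNat v ∧ w = getI r 0 0) := by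
  unfold buildAdj
  rw [foldl_addRoad_mem_iff (n + 1).toNat roads (List.replicate (n + 1).toNat [])
    (List.length_replicate) hr v w]
  have hrep : getL (List.replicate (n + 1).toNat ([] : List Int)) v = [] := by
    unfold getL
    rw [List.getD_eq_getElem?_getD, List.getElem?_replicate]
    split_ifs <;> rfl
  rw [hrep]
  simp

lemma setI_getElem? (l : List Int) (i : Int) (x : Int) (j : Nat) (h : j < l.length) :
    (setI l i x)[j]? = some (if pyResolve l.length i = j then x else l[j]) := by
  by_cases hi : pyResolve l.length i = j
  · rw [if_pos hi]
    unfold setI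
    rw [hi, List.getElem?_set_self (by omega)]
  · rw [if_neg hi]
    unfold setI
    rw [List.getElem?_set_ne hi, List.getElem?_eq_getElem h]

lemma setI_getElem (l : List Int) (i : Int) (x : Int) (j : Nat) (h : j < l.length) :
    (setI l i x)[j]'(by rw [length_setI]; exact h) = if pyResolve l.length i = j then x else l[j] := by
  rw [← Option.some_inj, ← List.getElem?_eq_getElem, setI_getElem? l i x j h]

-- extensional characterisation of one inner fold of the level pass (over one adjacency list)
lemma ws_fold_char (lvl : Nat) (hlvl : ((lvl : Int)) ≠ -1) :
    ∀ (ws acc dist : List Int),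
      ((ws.foldl (stepB lvl) (acc, dist)).2.length = dist.length) ∧
      (∀ j (h : j < dist.length), (ws.foldl (stepB lvl) (acc, dist)).2[j]?
        = some (if dist[j] = -1 ∧ ∃ w ∈ ws, pyResolve dist.length w = j then (lvl : Int) else dist[j])) ∧
      (∀ j, (∃ w ∈ (ws.foldl (stepB lvl) (acc, dist)).1, pyResolve dist.length w = j)
        ↔ (∃ w ∈ acc, pyResolve dist.length w = j)
          ∨ (∃ w ∈ ws, pyResolve dist.length w = j) ∧ ∃ h : j < dist.length, dist[j] = -1) := by
  intro ws
  induction ws with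
  | nil =>
    intro acc dist
    refine ⟨rfl, ?_, ?_⟩
    · intro j h
      simp [List.getElem?_eq_getElem h]
    · intro j
      simp
  | cons w ws IH =>
    intro acc dist
    by_cases h0 : getI dist w 0 = -1
    · have hrw : pyResolve dist.length w < dist.length :=
        resolve_lt_of_getI_ne dist w 0 (by rw [h0]; norm_num)
      have hdw : dist[pyResolve dist.length w] = -1 := by
        rw [← getI_of_lt dist w 0 hrw]; exact h0
      have hstep : stepB lvl (acc, dist) w = (acc ++ [w], setI dist w (lvl : Int)) := by
        simp [stepB, h0]
      obtain ⟨IHl, IHb, IHc⟩ := IH (acc ++ [w]) (setI dist w (lvl : Int))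
      have hlen' : (setI dist w (lvl : Int)).length = dist.length := length_setI _ _ _
      refine ⟨?_, ?_, ?_⟩
      · rw [List.foldl_cons, hstep]
        rw [IHl, hlen']
      · intro j h
        rw [List.foldl_cons, hstep, IHb j (by rw [hlen']; exact h)]
        rw [setI_getElem dist w (lvl : Int) j h]
        simp only [hlen']
        by_cases hj : pyResolve dist.length w = j
        · subst hj
          simp [hdw, hlvl]
        · simp only [if_neg hj]
          have e3 : (∃ x ∈ w :: ws, pyResolve dist.length x = j)
              ↔ (∃ x ∈ ws, pyResolve dist.length x = j) := by
            rw [List.exists_mem_cons_iff]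
            simp [hj]
          simp only [e3]
      · intro j
        simp only [hlen'] at IHc
        rw [List.foldl_cons, hstep, IHc j]
        have e1 : (∃ x ∈ acc ++ [w], pyResolve dist.length x = j)
            ↔ (∃ x ∈ acc, pyResolve dist.length x = j) ∨ pyResolve dist.length w = j := by
          constructor
          · rintro ⟨x, hxm, hxj⟩
            rcases List.mem_append.mp hxm with hx | hx
            · exact Or.inl ⟨x, hx, hxj⟩
            · rw [List.mem_singleton.mp hx] at hxj
              exact Or.inr hxj
          · rintro (⟨x, hx, hxj⟩ | hwj)
            · exact ⟨x, List.mem_append_left _ hx, hxj⟩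
            · exact ⟨w, List.mem_append_right _ (List.mem_singleton_self w), hwj⟩
        have e2 : (∃ h : j < dist.length,
              (setI dist w (lvl : Int))[j]'(by rw [hlen']; exact h) = -1)
            ↔ ∃ h : j < dist.length, (pyResolve dist.length w ≠ j ∧ dist[j] = -1) := by
          constructor
          · rintro ⟨hh, hx⟩
            rw [setI_getElem dist w (lvl : Int) j hh] at hx
            by_cases hj : pyResolve dist.length w = j
            · rw [if_pos hj] at hx
              exact absurd hx hlvl
            · rw [if_neg hj] at hx
              exact ⟨hh, hj, hx⟩
          · rintro ⟨hh, hj, hx⟩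
            refine ⟨hh, ?_⟩
            rw [setI_getElem dist w (lvl : Int) j hh, if_neg hj]
            exact hx
        have e3 : (∃ x ∈ w :: ws, pyResolve dist.length x = j)
            ↔ pyResolve dist.length w = j ∨ (∃ x ∈ ws, pyResolve dist.length x = j) := by
          rw [List.exists_mem_cons_iff]
        rw [e1, e2, e3]
        by_cases hj : pyResolve dist.length w = j
        · subst hj
          constructor
          · intro _
            exact Or.inr ⟨Or.inl rfl, hrw, hdw⟩
          · intro _
            exact Or.inl (Or.inr rfl)
        · constructor
          · rintro ((ha | hw) | ⟨hws, hh, hcj, hx⟩)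
            · exact Or.inl ha
            · exact absurd hw hj
            · exact Or.inr ⟨Or.inr hws, hh, hx⟩
          · rintro (ha | ⟨(hw | hws), hh, hx⟩)
            · exact Or.inl (Or.inl ha)
            · exact absurd hw hj
            · exact Or.inr ⟨hws, hh, hj, hx⟩
    · have hstep : stepB lvl (acc, dist) w = (acc, dist) := by
        simp [stepB, h0]
      obtain ⟨IHl, IHb, IHc⟩ := IH acc dist
      have hnw : ∀ j (h : j < dist.length), dist[j] = -1 → pyResolve dist.length w ≠ j := by
        intro j hjl hx hj
        apply h0
        rw [getI_of_lt dist w 0 (by rw [hj]; exact hjl)]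
        simp only [hj]
        exact hx
      refine ⟨?_, ?_, ?_⟩
      · rw [List.foldl_cons, hstep, IHl]
      · intro j h
        rw [List.foldl_cons, hstep, IHb j h]
        congr 1
        by_cases hx : dist[j] = -1
        · have e3 : (∃ x ∈ w :: ws, pyResolve dist.length x = j)
              ↔ (∃ x ∈ ws, pyResolve dist.length x = j) := by
            rw [List.exists_mem_cons_iff]
            simp [hnw j h hx]
          simp only [e3]
        · rw [if_neg (by intro hc; exact hx hc.1), if_neg (by intro hc; exact hx hc.1)]
      · intro j
        rw [List.foldl_cons, hstep, IHc j]
        constructor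
        · rintro (ha | ⟨⟨x, hxm, hxj⟩, hh, hx⟩)
          · exact Or.inl ha
          · exact Or.inr ⟨⟨x, List.mem_cons_of_mem w hxm, hxj⟩, hh, hx⟩
        · rintro (ha | ⟨⟨x, hxm, hxj⟩, hh, hx⟩)
          · exact Or.inl ha
          · rcases List.mem_cons.mp hxm with rfl | hxm
            · exact absurd hxj (hnw j hh hx)
            · exact Or.inr ⟨⟨x, hxm, hxj⟩, hh, hx⟩

-- extensional characterisation of one full level pass (over the frontier)
lemma frontier_fold_char (adj : List (List Int)) (lvl : Nat) (hlvl : ((lvl : Int)) ≠ -1) :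
    ∀ (frontier acc dist : List Int),
      ((frontier.foldl (relaxB adj lvl) (acc, dist)).2.length = dist.length) ∧
      (∀ j (h : j < dist.length), (frontier.foldl (relaxB adj lvl) (acc, dist)).2[j]?
        = some (if dist[j] = -1 ∧ ∃ v ∈ frontier, ∃ w ∈ getL adj v, pyResolve dist.length w = j
          then (lvl : Int) else dist[j])) ∧
      (∀ j, (∃ w ∈ (frontier.foldl (relaxB adj lvl) (acc, dist)).1, pyResolve dist.length w = j)
        ↔ (∃ w ∈ acc, pyResolve dist.length w = j)
          ∨ (∃ v ∈ frontier, ∃ w ∈ getL adj v, pyResolve dist.length w = j)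
            ∧ ∃ h : j < dist.length, dist[j] = -1) := by
  intro frontier
  induction frontier with
  | nil =>
    intro acc dist
    refine ⟨rfl, ?_, ?_⟩
    · intro j h
      simp [List.getElem?_eq_getElem h]
    · intro j
      simp
  | cons v fr IH =>
    intro acc dist
    obtain ⟨W1, Wb, Wc⟩ := ws_fold_char lvl hlvl (getL adj v) acc dist
    have hst : ∀ j (h : j < dist.length),
        ((getL adj v).foldl (stepB lvl) (acc, dist)).2[j]'(by rw [W1]; exact h)
          = if dist[j] = -1 ∧ ∃ w ∈ getL adj v, pyResolve dist.length w = j then (lvl : Int)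
            else dist[j] := by
      intro j h
      rw [← Option.some_inj, ← List.getElem?_eq_getElem, Wb j h]
    have hrelax : relaxB adj lvl (acc, dist) v = (getL adj v).foldl (stepB lvl) (acc, dist) := rfl
    obtain ⟨IHl, IHb, IHc⟩ := IH ((getL adj v).foldl (stepB lvl) (acc, dist)).1
      ((getL adj v).foldl (stepB lvl) (acc, dist)).2
    simp only [Prod.mk.eta] at IHl IHb IHc
    simp only [W1] at IHl IHb IHc
    refine ⟨?_, ?_, ?_⟩
    · rw [List.foldl_cons, hrelax, IHl]
    · intro j h
      rw [List.foldl_cons, hrelax, IHb j h]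
      by_cases hP : dist[j] = -1
      · by_cases hQv : ∃ w ∈ getL adj v, pyResolve dist.length w = j
        · simp [hst j h, hP, hQv, hlvl]
        · simp [hst j h, hP, hQv]
      · simp [hst j h, hP]
    · intro j
      rw [List.foldl_cons, hrelax, IHc j, Wc j]
      have e2 : (∃ h : j < dist.length,
            ((getL adj v).foldl (stepB lvl) (acc, dist)).2[j]'(by rw [W1]; exact h) = -1)
          ↔ ∃ h : j < dist.length,
            (dist[j] = -1 ∧ ¬ ∃ w ∈ getL adj v, pyResolve dist.length w = j) := by
        constructor
        · rintro ⟨hh, hx⟩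
          rw [hst j hh] at hx
          by_cases hQv : ∃ w ∈ getL adj v, pyResolve dist.length w = j
          · by_cases hP : dist[j] = -1
            · rw [if_pos ⟨hP, hQv⟩] at hx
              exact absurd hx hlvl
            · rw [if_neg (fun hc => hP hc.1)] at hx
              exact absurd hx hP
          · rw [if_neg (fun hc => hQv hc.2)] at hx
            exact ⟨hh, hx, hQv⟩
        · rintro ⟨hh, hP, hQv⟩
          refine ⟨hh, ?_⟩
          rw [hst j hh, if_neg (fun hc => hQv hc.2)]
          exact hP
      rw [e2, List.exists_mem_cons_iff]
      constructor
      · rintro ((ha | ⟨hQv, hh, hP⟩) | ⟨hQf, hh, hP, hnQv⟩)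
        · exact Or.inl ha
        · exact Or.inr ⟨Or.inl hQv, hh, hP⟩
        · exact Or.inr ⟨Or.inr hQf, hh, hP⟩
      · rintro (ha | ⟨(hQv | hQf), hh, hP⟩)
        · exact Or.inl (Or.inl ha)
        · exact Or.inl (Or.inr ⟨hQv, hh, hP⟩)
        · by_cases hQv : ∃ w ∈ getL adj v, pyResolve dist.length w = j
          · exact Or.inl (Or.inr ⟨hQv, hh, hP⟩)
          · exact Or.inr ⟨hQf, hh, hP, hQv⟩

-- which slots one edge sweep of B marks, read off the array from BEFORE the sweep
abbrev EdgeHit (dist : List Int) (lvl : Int) (roads : List (List Int)) (j : Nat) : Prop :=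
  ∃ r ∈ roads, (getI dist (getI r 0 0) 0 = lvl - 1 ∧ pyResolve dist.length (getI r 1 0) = j)
    ∨ (getI dist (getI r 1 0) 0 = lvl - 1 ∧ pyResolve dist.length (getI r 0 0) = j)

-- extensional characterisation of one edge sweep of B
lemma edge_fold_char (lvl : Int) (hlvl : 1 ≤ lvl) :
    ∀ (roads : List (List Int)) (flag : Bool) (dist : List Int),
      (∀ r ∈ roads, pyResolve dist.length (getI r 0 0) < dist.length ∧
        pyResolve dist.length (getI r 1 0) < dist.length) →
      ((roads.foldl (edgeStep lvl) (flag, dist)).2.length = dist.length) ∧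
      (∀ j (h : j < dist.length), (roads.foldl (edgeStep lvl) (flag, dist)).2[j]?
        = some (if dist[j] = -1 ∧ EdgeHit dist lvl roads j then lvl else dist[j])) ∧
      ((roads.foldl (edgeStep lvl) (flag, dist)).1 = true
        ↔ flag = true ∨ ∃ j, ∃ h : j < dist.length, dist[j] = -1 ∧ EdgeHit dist lvl roads j) := by
  intro roads
  induction roads with
  | nil =>
    intro flag dist _
    refine ⟨rfl, ?_, ?_⟩
    · intro j h
      simp [EdgeHit, List.getElem?_eq_getElem h]
    · simp [EdgeHit]
  | cons r rs IH =>
    intro flag dist hr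
    obtain ⟨hra, hrb⟩ := hr r List.mem_cons_self
    have hrs : ∀ r' ∈ rs, pyResolve dist.length (getI r' 0 0) < dist.length ∧
        pyResolve dist.length (getI r' 1 0) < dist.length :=
      fun r' hr' => hr r' (List.mem_cons_of_mem r hr')
    have eh3 : ∀ j, EdgeHit dist lvl (r :: rs) j ↔
        ((getI dist (getI r 0 0) 0 = lvl - 1 ∧ pyResolve dist.length (getI r 1 0) = j)
          ∨ (getI dist (getI r 1 0) 0 = lvl - 1 ∧ pyResolve dist.length (getI r 0 0) = j))
        ∨ EdgeHit dist lvl rs j := by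
      intro j
      simp only [EdgeHit, List.exists_mem_cons_iff]
    by_cases hC1 : getI dist (getI r 0 0) 0 = lvl - 1 ∧ getI dist (getI r 1 0) 0 = -1
    · -- first branch fires: slot res(r1) gets marked
      have hstep : edgeStep lvl (flag, dist) r = (true, setI dist (getI r 1 0) lvl) := by
        simp only [edgeStep]
        rw [if_pos hC1, if_neg (fun hc => by
          rw [getI_setI_self dist (getI r 1 0) lvl 0 hrb] at hc
          omega)]
      have hmk : ∀ {j}, pyResolve dist.length (getI r 1 0) = j →
          ((getI dist (getI r 0 0) 0 = lvl - 1 ∧ pyResolve dist.length (getI r 1 0) = j)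
            ∨ (getI dist (getI r 1 0) 0 = lvl - 1 ∧ pyResolve dist.length (getI r 0 0) = j)) :=
        fun hj => Or.inl ⟨hC1.1, hj⟩
      have hno : ∀ j, pyResolve dist.length (getI r 1 0) ≠ j →
          ¬((getI dist (getI r 0 0) 0 = lvl - 1 ∧ pyResolve dist.length (getI r 1 0) = j)
            ∨ (getI dist (getI r 1 0) 0 = lvl - 1 ∧ pyResolve dist.length (getI r 0 0) = j)) := by
        intro j hj
        rintro (⟨_, h2⟩ | ⟨h1, _⟩)
        · exact hj h2
        · rw [hC1.2] at h1
          omega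
      have hrE : pyResolve dist.length (getI r 1 0) < dist.length := hrb
      have hCE : getI dist (getI r 1 0) 0 = -1 := hC1.2
      set E := getI r 1 0 with hEdef
      have hlen1 : (setI dist E lvl).length = dist.length := length_setI _ _ _
      have hdeq : dist[pyResolve dist.length E]'hrE = -1 := by
        rw [← getI_of_lt dist E 0 hrE]
        exact hCE
      have hd1 : ∀ j (h : j < dist.length), (setI dist E lvl)[j]'(by rw [hlen1]; exact h)
          = if pyResolve dist.length E = j then lvl else dist[j] :=
        fun j h => setI_getElem dist E lvl j h
      have hgl : ∀ x : Int, (getI (setI dist E lvl) x 0 = lvl - 1) ↔ (getI dist x 0 = lvl - 1) := by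
        intro x
        by_cases hx : pyResolve dist.length x = pyResolve dist.length E
        · have h1 : getI (setI dist E lvl) x 0 = lvl := by
            rw [getI_eq_of_resolve_eq (setI dist E lvl) x E 0 (by rw [hlen1]; exact hx),
              getI_setI_self dist E lvl 0 hrE]
          have h2 : getI dist x 0 = -1 := by
            rw [getI_eq_of_resolve_eq dist x E 0 hx]
            exact hCE
          rw [h1, h2]
          constructor <;> intro hc <;> omega
        · rw [getI_setI_ne dist E x lvl 0 (fun hc => hx hc.symm)]
      have hEH : ∀ rs' j, EdgeHit (setI dist E lvl) lvl rs' j ↔ EdgeHit dist lvl rs' j := by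
        intro rs' j
        simp only [EdgeHit, hlen1, hgl]
      have hrs1 : ∀ r' ∈ rs, pyResolve (setI dist E lvl).length (getI r' 0 0) < (setI dist E lvl).length ∧
          pyResolve (setI dist E lvl).length (getI r' 1 0) < (setI dist E lvl).length := by
        intro r' hr'
        rw [hlen1]
        exact hrs r' hr'
      obtain ⟨IHl, IHb, IHc⟩ := IH true (setI dist E lvl) hrs1
      simp only [hlen1] at IHl IHb IHc
      have hhit : EdgeHit dist lvl (r :: rs) (pyResolve dist.length E) :=
        (eh3 _).mpr (Or.inl (hmk rfl))
      refine ⟨?_, ?_, ?_⟩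
      · rw [List.foldl_cons, hstep, IHl]
      · intro h_j hh
        rw [List.foldl_cons, hstep, IHb h_j hh]
        simp only [hd1 h_j hh, hEH rs h_j]
        by_cases hj : pyResolve dist.length E = h_j
        · have hdj : dist[h_j]'hh = -1 := by
            subst hj
            exact hdeq
          have hhit' : EdgeHit dist lvl (r :: rs) h_j := by
            rw [← hj]
            exact hhit
          have hne : (lvl : Int) ≠ -1 := by omega
          simp [hj, hdj, hhit', hne]
        · simp only [if_neg hj]
          have hcond : (dist[h_j]'hh = -1 ∧ EdgeHit dist lvl rs h_j)
              ↔ (dist[h_j]'hh = -1 ∧ EdgeHit dist lvl (r :: rs) h_j) := by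
            constructor
            · rintro ⟨hP, hrs'⟩
              exact ⟨hP, (eh3 h_j).mpr (Or.inr hrs')⟩
            · rintro ⟨hP, hhit2⟩
              rcases (eh3 h_j).mp hhit2 with hhit2 | hhit2
              · exact absurd hhit2 (hno h_j hj)
              · exact ⟨hP, hhit2⟩
          simp only [hcond]
      · rw [List.foldl_cons, hstep, IHc]
        constructor
        · intro _
          exact Or.inr ⟨pyResolve dist.length E, hrE, hdeq, hhit⟩
        · intro _
          exact Or.inl trivial
    · by_cases hC2 : getI dist (getI r 1 0) 0 = lvl - 1 ∧ getI dist (getI r 0 0) 0 = -1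
      · -- second branch fires: slot res(r0) gets marked
        have hstep : edgeStep lvl (flag, dist) r = (true, setI dist (getI r 0 0) lvl) := by
          simp only [edgeStep]
          rw [if_neg hC1, if_pos hC2]
        have hmk : ∀ {j}, pyResolve dist.length (getI r 0 0) = j →
            ((getI dist (getI r 0 0) 0 = lvl - 1 ∧ pyResolve dist.length (getI r 1 0) = j)
              ∨ (getI dist (getI r 1 0) 0 = lvl - 1 ∧ pyResolve dist.length (getI r 0 0) = j)) :=
          fun hj => Or.inr ⟨hC2.1, hj⟩
        have hno : ∀ j, pyResolve dist.length (getI r 0 0) ≠ j →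
            ¬((getI dist (getI r 0 0) 0 = lvl - 1 ∧ pyResolve dist.length (getI r 1 0) = j)
              ∨ (getI dist (getI r 1 0) 0 = lvl - 1 ∧ pyResolve dist.length (getI r 0 0) = j)) := by
          intro j hj
          rintro (⟨h1, _⟩ | ⟨_, h2⟩)
          · rw [hC2.2] at h1
            omega
          · exact hj h2
        have hrE : pyResolve dist.length (getI r 0 0) < dist.length := hra
        have hCE : getI dist (getI r 0 0) 0 = -1 := hC2.2
        set E := getI r 0 0 with hEdef
        have hlen1 : (setI dist E lvl).length = dist.length := length_setI _ _ _
        have hdeq : dist[pyResolve dist.length E]'hrE = -1 := by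
          rw [← getI_of_lt dist E 0 hrE]
          exact hCE
        have hd1 : ∀ j (h : j < dist.length), (setI dist E lvl)[j]'(by rw [hlen1]; exact h)
            = if pyResolve dist.length E = j then lvl else dist[j] :=
          fun j h => setI_getElem dist E lvl j h
        have hgl : ∀ x : Int, (getI (setI dist E lvl) x 0 = lvl - 1) ↔ (getI dist x 0 = lvl - 1) := by
          intro x
          by_cases hx : pyResolve dist.length x = pyResolve dist.length E
          · have h1 : getI (setI dist E lvl) x 0 = lvl := by
              rw [getI_eq_of_resolve_eq (setI dist E lvl) x E 0 (by rw [hlen1]; exact hx),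
                getI_setI_self dist E lvl 0 hrE]
            have h2 : getI dist x 0 = -1 := by
              rw [getI_eq_of_resolve_eq dist x E 0 hx]
              exact hCE
            rw [h1, h2]
            constructor <;> intro hc <;> omega
          · rw [getI_setI_ne dist E x lvl 0 (fun hc => hx hc.symm)]
        have hEH : ∀ rs' j, EdgeHit (setI dist E lvl) lvl rs' j ↔ EdgeHit dist lvl rs' j := by
          intro rs' j
          simp only [EdgeHit, hlen1, hgl]
        have hrs1 : ∀ r' ∈ rs, pyResolve (setI dist E lvl).length (getI r' 0 0) < (setI dist E lvl).length ∧
            pyResolve (setI dist E lvl).length (getI r' 1 0) < (setI dist E lvl).length := by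
          intro r' hr'
          rw [hlen1]
          exact hrs r' hr'
        obtain ⟨IHl, IHb, IHc⟩ := IH true (setI dist E lvl) hrs1
        simp only [hlen1] at IHl IHb IHc
        have hhit : EdgeHit dist lvl (r :: rs) (pyResolve dist.length E) :=
          (eh3 _).mpr (Or.inl (hmk rfl))
        refine ⟨?_, ?_, ?_⟩
        · rw [List.foldl_cons, hstep, IHl]
        · intro h_j hh
          rw [List.foldl_cons, hstep, IHb h_j hh]
          simp only [hd1 h_j hh, hEH rs h_j]
          by_cases hj : pyResolve dist.length E = h_j
          · have hdj : dist[h_j]'hh = -1 := by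
              subst hj
              exact hdeq
            have hhit' : EdgeHit dist lvl (r :: rs) h_j := by
              rw [← hj]
              exact hhit
            have hne : (lvl : Int) ≠ -1 := by omega
            simp [hj, hdj, hhit', hne]
          · simp only [if_neg hj]
            have hcond : (dist[h_j]'hh = -1 ∧ EdgeHit dist lvl rs h_j)
                ↔ (dist[h_j]'hh = -1 ∧ EdgeHit dist lvl (r :: rs) h_j) := by
              constructor
              · rintro ⟨hP, hrs'⟩
                exact ⟨hP, (eh3 h_j).mpr (Or.inr hrs')⟩
              · rintro ⟨hP, hhit2⟩
                rcases (eh3 h_j).mp hhit2 with hhit2 | hhit2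
                · exact absurd hhit2 (hno h_j hj)
                · exact ⟨hP, hhit2⟩
            simp only [hcond]
        · rw [List.foldl_cons, hstep, IHc]
          constructor
          · intro _
            exact Or.inr ⟨pyResolve dist.length E, hrE, hdeq, hhit⟩
          · intro _
            exact Or.inl trivial
      · -- the road changes nothing this sweep
        have hstep : edgeStep lvl (flag, dist) r = (flag, dist) := by
          simp only [edgeStep]
          rw [if_neg hC1, if_neg hC2]
        obtain ⟨IHl, IHb, IHc⟩ := IH flag dist hrs
        have hno : ∀ j (h : j < dist.length), dist[j] = -1 →
            ¬((getI dist (getI r 0 0) 0 = lvl - 1 ∧ pyResolve dist.length (getI r 1 0) = j)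
              ∨ (getI dist (getI r 1 0) 0 = lvl - 1 ∧ pyResolve dist.length (getI r 0 0) = j)) := by
          intro j h hP
          rintro (⟨h1, h2⟩ | ⟨h1, h2⟩)
          · apply hC1
            refine ⟨h1, ?_⟩
            rw [getI_of_lt dist (getI r 1 0) 0 hrb]
            simp only [h2]
            exact hP
          · apply hC2
            refine ⟨h1, ?_⟩
            rw [getI_of_lt dist (getI r 0 0) 0 hra]
            simp only [h2]
            exact hP
        refine ⟨?_, ?_, ?_⟩
        · rw [List.foldl_cons, hstep, IHl]
        · intro j h
          rw [List.foldl_cons, hstep, IHb j h]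
          have hcond : (dist[j]'h = -1 ∧ EdgeHit dist lvl rs j)
              ↔ (dist[j]'h = -1 ∧ EdgeHit dist lvl (r :: rs) j) := by
            constructor
            · rintro ⟨hP, hrs'⟩
              exact ⟨hP, (eh3 j).mpr (Or.inr hrs')⟩
            · rintro ⟨hP, hhit⟩
              rcases (eh3 j).mp hhit with hhit | hhit
              · exact absurd hhit (hno j h hP)
              · exact ⟨hP, hhit⟩
          simp only [hcond]
        · rw [List.foldl_cons, hstep, IHc]
          constructor
          · rintro (hf | ⟨j, h, hP, hhit⟩)
            · exact Or.inl hf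
            · exact Or.inr ⟨j, h, hP, (eh3 j).mpr (Or.inr hhit)⟩
          · rintro (hf | ⟨j, h, hP, hhit⟩)
            · exact Or.inl hf
            · rcases (eh3 j).mp hhit with hhit | hhit
              · exact absurd hhit (hno j h hP)
              · exact Or.inr ⟨j, h, hP, hhit⟩

-- pointwise (-1)-preservation gives ≤ on the unreached count, strict at a changed slot
lemma countP_pointwise (p : Int → Bool) : ∀ (l1 l2 : List Int), l2.length = l1.length →
    (∀ j (h1 : j < l1.length) (h2 : j < l2.length), p (l2[j]) = true → p (l1[j]) = true) →
    (l2.countP p ≤ l1.countP p) ∧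
    (∀ j0 (h1 : j0 < l1.length) (h2 : j0 < l2.length), p (l1[j0]) = true → ¬ p (l2[j0]) = true →
      l2.countP p < l1.countP p) := by
  intro l1
  induction l1 with
  | nil =>
    intro l2 hlen _
    rw [List.length_nil] at hlen
    rw [List.eq_nil_of_length_eq_zero hlen]
    exact ⟨le_refl _, fun j0 h1 => absurd h1 (by simp)⟩
  | cons x xs IHx =>
    intro l2 hlen himp
    cases l2 with
    | nil => simp at hlen
    | cons y ys =>
      simp only [List.length_cons, Nat.add_right_cancel_iff] at hlen
      have hhead : p y = true → p x = true := by
        have := himp 0 (by simp) (by simp)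
        simpa using this
      have htail : ∀ j (h1 : j < xs.length) (h2 : j < ys.length),
          p (ys[j]) = true → p (xs[j]) = true := by
        intro j h1 h2 hp
        have h := himp (j + 1) (by simpa using h1) (by simpa using h2)
        simp only [List.getElem_cons_succ] at h
        exact h hp
      obtain ⟨IH1, IH2⟩ := IHx ys hlen htail
      constructor
      · rw [List.countP_cons, List.countP_cons]
        by_cases hy : p y = true
        · rw [if_pos hy, if_pos (hhead hy)]
          omega
        · rw [if_neg hy]
          split_ifs <;> omega
      · intro j0 h1 h2 hp hnp
        rw [List.countP_cons, List.countP_cons]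
        cases j0 with
        | zero =>
          simp only [List.getElem_cons_zero] at hp hnp
          rw [if_pos hp, if_neg hnp]
          omega
        | succ j =>
          have hlt := IH2 j (by simpa using h1) (by simpa using h2)
            (by simpa using hp) (by simpa using hnp)
          by_cases hy : p y = true
          · rw [if_pos hy, if_pos (hhead hy)]
            omega
          · rw [if_neg hy]
            split_ifs <;> omega

lemma levelLoop_nil (adj : List (List Int)) (fuel : Nat) (dist : List Int) (level : Nat) :
    levelLoop adj fuel [] dist level = dist := by
  cases fuel <;> simp [levelLoop]

-- the coupling: from a synchronised state, the level loop and B's edge-sweep loop agree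
lemma couple (m : Nat) (adj roads : List (List Int))
    (Hroads : ∀ r ∈ roads, pyResolve m (getI r 0 0) < m ∧ pyResolve m (getI r 1 0) < m)
    (HadjIff : ∀ (v w : Int), w ∈ getL adj v ↔
      ∃ r ∈ roads, (pyResolve m (getI r 0 0) = pyResolve m v ∧ w = getI r 1 0) ∨
        (pyResolve m (getI r 1 0) = pyResolve m v ∧ w = getI r 0 0)) :
    ∀ (fuelR fuelB : Nat) (frontier dist : List Int) (level : Nat),
      dist.length = m → frontier ≠ [] →
      (∀ w ∈ frontier, pyResolve m w < m) →
      (∀ j (h : j < dist.length), dist[j] = (level : Int) ↔ ∃ w ∈ frontier, pyResolve m w = j) →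
      (∀ j (h : j < dist.length), dist[j] ≤ (level : Int)) →
      Nc dist + 1 ≤ fuelB → Nc dist + 1 ≤ fuelR →
      levelLoop adj fuelB frontier dist level = passLoop roads fuelR dist (level : Int) := by
  intro fuelR
  induction fuelR with
  | zero =>
    intro fuelB frontier dist level hlen hne hfr hiff hle hfB hfR
    exfalso
    omega
  | succ fR IH =>
    intro fuelB frontier dist level hlen hne hfr hiff hle hfB hfR
    subst hlen
    cases fuelB with
    | zero =>
      exfalso
      omega
    | succ fB =>
      have hcast : ((level + 1 : Nat) : Int) = (level : Int) + 1 := by push_cast; ring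
      have hlvlne : (((level + 1 : Nat) : Int)) ≠ -1 := by push_cast; omega
      obtain ⟨Fl, Fb, Fc⟩ := frontier_fold_char adj (level + 1) hlvlne frontier [] dist
      have hlvl1 : (1 : Int) ≤ ((level : Int) + 1) := by omega
      obtain ⟨El, Eb, Ec⟩ := edge_fold_char ((level : Int) + 1) hlvl1 roads false dist Hroads
      have hd2 : ∀ j (h : j < dist.length),
          (frontier.foldl (relaxB adj (level + 1)) ([], dist)).2[j]'(by rw [Fl]; exact h)
            = if dist[j] = -1 ∧ ∃ v ∈ frontier, ∃ w ∈ getL adj v, pyResolve dist.length w = j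
              then ((level + 1 : Nat) : Int) else dist[j] := by
        intro j h
        rw [← Option.some_inj, ← List.getElem?_eq_getElem, Fb j h]
      have hcnd : ∀ j, j < dist.length →
          ((∃ v ∈ frontier, ∃ w ∈ getL adj v, pyResolve dist.length w = j)
            ↔ EdgeHit dist ((level : Int) + 1) roads j) := by
        intro j hjl
        constructor
        · rintro ⟨v, hv, w, hw, hwj⟩
          rcases (HadjIff v w).mp hw with ⟨r, hrm, (⟨hr0, hw1⟩ | ⟨hr1, hw0⟩)⟩
          · refine ⟨r, hrm, Or.inl ⟨?_, by rw [← hw1]; exact hwj⟩⟩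
            rw [getI_of_lt dist (getI r 0 0) 0 (Hroads r hrm).1]
            have hv' := (hiff (pyResolve dist.length (getI r 0 0)) (Hroads r hrm).1).mpr
              ⟨v, hv, hr0.symm⟩
            rw [hv']
            ring
          · refine ⟨r, hrm, Or.inr ⟨?_, by rw [← hw0]; exact hwj⟩⟩
            rw [getI_of_lt dist (getI r 1 0) 0 (Hroads r hrm).2]
            have hv' := (hiff (pyResolve dist.length (getI r 1 0)) (Hroads r hrm).2).mpr
              ⟨v, hv, hr1.symm⟩
            rw [hv']
            ring
        · rintro ⟨r, hrm, (⟨h1, h2⟩ | ⟨h1, h2⟩)⟩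
          · rw [getI_of_lt dist (getI r 0 0) 0 (Hroads r hrm).1] at h1
            have h1' : dist[pyResolve dist.length (getI r 0 0)]'((Hroads r hrm).1)
                = (level : Int) := by
              rw [h1]
              ring
            obtain ⟨v, hv, hvr⟩ := (hiff _ (Hroads r hrm).1).mp h1'
            exact ⟨v, hv, getI r 1 0,
              (HadjIff v (getI r 1 0)).mpr ⟨r, hrm, Or.inl ⟨hvr.symm, rfl⟩⟩, h2⟩
          · rw [getI_of_lt dist (getI r 1 0) 0 (Hroads r hrm).2] at h1
            have h1' : dist[pyResolve dist.length (getI r 1 0)]'((Hroads r hrm).2)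
                = (level : Int) := by
              rw [h1]
              ring
            obtain ⟨v, hv, hvr⟩ := (hiff _ (Hroads r hrm).2).mp h1'
            exact ⟨v, hv, getI r 0 0,
              (HadjIff v (getI r 0 0)).mpr ⟨r, hrm, Or.inr ⟨hvr.symm, rfl⟩⟩, h2⟩
      have hpassEq : (frontier.foldl (relaxB adj (level + 1)) ([], dist)).2
          = (roads.foldl (edgeStep ((level : Int) + 1)) (false, dist)).2 := by
        apply List.ext_getElem?
        intro j
        by_cases hj : j < dist.length
        · rw [Fb j hj, Eb j hj, hcast]
          congr 1
          by_cases hP : dist[j] = -1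
          · simp only [hcnd j hj]
          · rw [if_neg (fun hc => hP hc.1), if_neg (fun hc => hP hc.1)]
        · rw [List.getElem?_eq_none (by rw [Fl]; omega),
            List.getElem?_eq_none (by rw [El]; omega)]
      have hflag : (roads.foldl (edgeStep ((level : Int) + 1)) (false, dist)).1 = true
          ↔ (frontier.foldl (relaxB adj (level + 1)) ([], dist)).1 ≠ [] := by
        rw [Ec]
        constructor
        · rintro (hf | ⟨j, h, hP, hhit⟩)
          · exact absurd hf (by simp)
          · obtain ⟨w, hwm, _⟩ := (Fc j).mpr (Or.inr ⟨(hcnd j h).mpr hhit, h, hP⟩)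
            intro hnil
            rw [hnil] at hwm
            simp at hwm
        · intro hΔ
          right
          obtain ⟨w, hwm⟩ := List.exists_mem_of_ne_nil _ hΔ
          rcases (Fc (pyResolve dist.length w)).mp ⟨w, hwm, rfl⟩ with hacc | ⟨hAdj, hh, hP⟩
          · simp at hacc
          · exact ⟨pyResolve dist.length w, hh, hP, (hcnd _ hh).mp hAdj⟩
      have hEmp : frontier.isEmpty = false := by
        cases frontier
        · exact absurd rfl hne
        · rfl
      have hLun : levelLoop adj (fB + 1) frontier dist level
          = if frontier.isEmpty then dist
            else levelLoop adj fB (frontier.foldl (relaxB adj (level + 1)) ([], dist)).1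
              (frontier.foldl (relaxB adj (level + 1)) ([], dist)).2 (level + 1) := rfl
      have hRun : passLoop roads (fR + 1) dist ((level : Int))
          = if (roads.foldl (edgeStep ((level : Int) + 1)) (false, dist)).1 = true
            then passLoop roads fR
              (roads.foldl (edgeStep ((level : Int) + 1)) (false, dist)).2 ((level : Int) + 1)
            else (roads.foldl (edgeStep ((level : Int) + 1)) (false, dist)).2 := rfl
      rw [hLun, hRun, if_neg (by rw [hEmp]; simp)]
      by_cases hΔ : (frontier.foldl (relaxB adj (level + 1)) ([], dist)).1 = []
      · rw [if_neg (fun h => (hflag.mp h) hΔ), hΔ, levelLoop_nil, hpassEq]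
      · rw [if_pos (hflag.mpr hΔ), ← hpassEq]
        have hfr2 : ∀ w ∈ (frontier.foldl (relaxB adj (level + 1)) ([], dist)).1,
            pyResolve dist.length w < dist.length := by
          intro w hw
          rcases (Fc (pyResolve dist.length w)).mp ⟨w, hw, rfl⟩ with hacc | ⟨_, hh, _⟩
          · simp at hacc
          · exact hh
        have hiff2 : ∀ j (h : j < (frontier.foldl (relaxB adj (level + 1)) ([], dist)).2.length),
            (frontier.foldl (relaxB adj (level + 1)) ([], dist)).2[j] = ((level + 1 : Nat) : Int)
              ↔ ∃ w ∈ (frontier.foldl (relaxB adj (level + 1)) ([], dist)).1,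
                pyResolve dist.length w = j := by
          intro j h
          have hj : j < dist.length := by rw [← Fl]; exact h
          rw [hd2 j hj]
          constructor
          · intro hval
            by_cases hc : dist[j] = -1 ∧ ∃ v ∈ frontier, ∃ w ∈ getL adj v,
                pyResolve dist.length w = j
            · exact (Fc j).mpr (Or.inr ⟨hc.2, hj, hc.1⟩)
            · rw [if_neg hc, hcast] at hval
              have := hle j hj
              omega
          · intro hΔw
            rcases (Fc j).mp hΔw with hacc | ⟨hAdj, hh, hP⟩
            · simp at hacc
            · rw [if_pos ⟨hP, hAdj⟩]
        have hle2 : ∀ j (h : j < (frontier.foldl (relaxB adj (level + 1)) ([], dist)).2.length),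
            (frontier.foldl (relaxB adj (level + 1)) ([], dist)).2[j]
              ≤ ((level + 1 : Nat) : Int) := by
          intro j h
          have hj : j < dist.length := by rw [← Fl]; exact h
          rw [hd2 j hj]
          split_ifs
          · exact le_refl _
          · rw [hcast]
            have := hle j hj
            omega
        have hpoint : ∀ j (h1 : j < dist.length)
            (h2 : j < (frontier.foldl (relaxB adj (level + 1)) ([], dist)).2.length),
            (fun x => decide (x = -1)) ((frontier.foldl (relaxB adj (level + 1)) ([], dist)).2[j])
              = true →
            (fun x => decide (x = -1)) (dist[j]) = true := by
          intro j h1 h2 hdec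
          simp only [decide_eq_true_eq] at hdec ⊢
          rw [hd2 j h1] at hdec
          by_cases hc : dist[j] = -1 ∧ ∃ v ∈ frontier, ∃ w ∈ getL adj v,
              pyResolve dist.length w = j
          · exact hc.1
          · rw [if_neg hc] at hdec
            exact hdec
        obtain ⟨hcle, hclt⟩ := countP_pointwise (fun x => decide (x = -1)) dist
          (frontier.foldl (relaxB adj (level + 1)) ([], dist)).2 Fl hpoint
        obtain ⟨w, hwm⟩ := List.exists_mem_of_ne_nil _ hΔ
        rcases (Fc (pyResolve dist.length w)).mp ⟨w, hwm, rfl⟩ with hacc | ⟨hAdj, hh, hP⟩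
        · simp at hacc
        · have hmarked : (frontier.foldl (relaxB adj (level + 1)) ([], dist)).2[pyResolve dist.length w]'(by rw [Fl]; exact hh)
              = ((level + 1 : Nat) : Int) := by
            rw [hd2 _ hh, if_pos ⟨hP, hAdj⟩]
          have hNlt : Nc (frontier.foldl (relaxB adj (level + 1)) ([], dist)).2 < Nc dist := by
            unfold Nc
            refine hclt (pyResolve dist.length w) hh (by rw [Fl]; exact hh) (by simp [hP]) ?_
            simp only [decide_eq_true_eq]
            rw [hmarked]
            omega
          rw [show ((level : Int) + 1) = ((level + 1 : Nat) : Int) from hcast.symm]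
          exact IH fB _ _ (level + 1) Fl hΔ hfr2 hiff2 hle2 (by omega) (by omega)

-- ===== VERDICT (by name: the statement is the Claim_ definition above) =====
theorem solution_spec : Claim_equal_solution := by
  intro n roads sources destination hDom hPre
  obtain ⟨hn, ⟨hdl, hdu⟩, hroads, hsources, hzero⟩ := hPre
  unfold Spec_solution
  simp only [solution, solution_alt]
  set m := (n + 1).toNat with hm
  set adj := buildAdj n roads with hadjdef
  have h1 : setI (List.replicate m (-1 : Int)) destination 0
      = (setI (List.replicate m (0 : Int)) destination 1).map (fun y => y - 1) := by
    rw [map_sub_one_setI]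
    norm_num [List.map_replicate]
  have hrl : pyResolve (List.replicate m (0 : Int)).length destination
      < (List.replicate m (0 : Int)).length := by
    simp only [List.length_replicate]
    unfold pyResolve
    split_ifs with h <;> omega
  have h2 : ∀ x ∈ [destination],
      getI (setI (List.replicate m (0 : Int)) destination 1) x 1 = ((0 : Nat) : Int) + 1 := by
    intro x hx
    rw [List.mem_singleton.mp hx, getI_setI_self _ _ _ _ hrl]
    norm_num
  have hZ : Zc (setI (List.replicate m (0 : Int)) destination 1) ≤ m := by
    refine le_trans List.countP_le_length ?_
    rw [length_setI]
    simp
  have main := main_bfs adj (m + 1) [destination] (2 * m + 2) []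
    (setI (List.replicate m (0 : Int)) destination 1)
    (setI (List.replicate m (-1 : Int)) destination 0) 0
    h1 h2 (by simp) (by simp only [List.length_cons, List.length_nil]; omega) (by simp; omega)
  simp only [List.append_nil] at main
  have hBunfold : levelLoop adj (m + 2) [destination]
        (setI (List.replicate m (-1 : Int)) destination 0) 0
      = (let st := [destination].foldl (relaxB adj (0 + 1))
            ([], setI (List.replicate m (-1 : Int)) destination 0);
         levelLoop adj (m + 1) st.1 st.2 (0 + 1)) := rfl
  have hdist : levelLoop adj (m + 2) [destination]
        (setI (List.replicate m (-1 : Int)) destination 0) 0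
      = (bfsQ adj (2 * m + 2) [destination]
          (setI (List.replicate m (0 : Int)) destination 1)).map (fun y => y - 1) := by
    rw [hBunfold, ← main]
  -- B side: the edge-sweep loop agrees with the level loop from the initial state
  have hlen0 : (setI (List.replicate m (-1 : Int)) destination 0).length = m := by
    rw [length_setI, List.length_replicate]
  have hrd : pyResolve m destination < m := by
    unfold pyResolve; split_ifs <;> omega
  have Hroads' : ∀ r ∈ roads, pyResolve m (getI r 0 0) < m ∧ pyResolve m (getI r 1 0) < m := by
    intro r hr
    obtain ⟨hlr, ⟨h00, h01⟩, h10, h11⟩ := hroads r hr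
    have e0 : getI r 0 0 = r.getD 0 0 := by unfold getI; rfl
    have e1 : getI r 1 0 = r.getD 1 0 := by unfold getI; rfl
    rw [e0, e1]
    constructor <;> (unfold pyResolve; split_ifs <;> omega)
  have hget0 : ∀ j (h : j < m), (setI (List.replicate m (-1 : Int)) destination 0)[j]'(by omega)
      = if pyResolve m destination = j then 0 else -1 := by
    intro j h
    simp only [setI, List.length_replicate, List.getElem_set, List.getElem_replicate]
  have hpass : levelLoop adj (m + 2) [destination]
        (setI (List.replicate m (-1 : Int)) destination 0) 0
      = passLoop roads (m + 2) (setI (List.replicate m (-1 : Int)) destination 0) ((0 : Nat) : Int) := by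
    refine couple m adj roads Hroads' (buildAdj_mem_iff n roads Hroads') (m + 2) (m + 2)
      [destination] _ 0 hlen0 (by simp) ?_ ?_ ?_ ?_ ?_
    · intro w hw
      rw [List.mem_singleton.mp hw]
      exact hrd
    · intro j h
      rw [hget0 j (by rw [hlen0] at h; exact h)]
      constructor
      · intro hj
        refine ⟨destination, List.mem_singleton_self _, ?_⟩
        by_contra hne
        rw [if_neg hne] at hj
        norm_num at hj
      · rintro ⟨w, hw, hwj⟩
        rw [List.mem_singleton.mp hw] at hwj
        rw [if_pos hwj]
        norm_num
    · intro j h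
      rw [hget0 j (by rw [hlen0] at h; exact h)]
      split_ifs <;> norm_num
    · have hcl := List.countP_le_length (l := setI (List.replicate m (-1 : Int)) destination 0)
        (p := fun x => decide (x = -1))
      unfold Nc
      omega
    · have hcl := List.countP_le_length (l := setI (List.replicate m (-1 : Int)) destination 0)
        (p := fun x => decide (x = -1))
      unfold Nc
      omega
  rw [show ((0 : Nat) : Int) = (0 : Int) by norm_num] at hpass
  rw [← hpass, hdist]
  -- now compare the two output maps entry by entry (identical to the A-side endgame)
  refine List.map_eq_map_iff.mpr ?_
  intro s hs
  by_cases h : s = 0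
  · subst h
    obtain ⟨hd0, hr0⟩ := hzero hs
    have Hadj : ∀ v, ∀ w ∈ getL adj v, pyResolve m w ≠ 0 := by
      intro v w hw
      obtain ⟨r, hr, hcase⟩ := buildAdj_mem n roads v w hw
      have e0 : getI r 0 0 = r.getD 0 0 := by unfold getI; rfl
      have e1 : getI r 1 0 = r.getD 1 0 := by unfold getI; rfl
      obtain ⟨h00, h01⟩ := hr0 r hr
      rcases hcase with h | h
      · rw [h, e0]; exact h00
      · rw [h, e1]; exact h01
    rw [if_pos rfl, getI_map_sub_one]
    have hres0 : ∀ L : Nat, pyResolve L 0 = 0 := fun L => rfl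
    have hg0 : getI (bfsQ adj (2 * m + 2) [destination]
        (setI (List.replicate m (0 : Int)) destination 1)) 0 1 = 0 := by
      unfold getI
      rw [hres0, bfsQ_getD0 adj m Hadj _ _ _ _ (by rw [length_setI]; simp)]
      unfold setI
      rw [getD0_set _ _ _ _ (by rw [List.length_replicate]; exact hd0)]
      rw [List.getD_eq_getElem?_getD, List.getElem?_replicate, if_pos (by omega)]
      rfl
    rw [hg0]
    norm_num
  · rw [if_neg h, getI_map_sub_one]
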